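-- pv_equiv track=rewrite | github.com/pypi-data/pypi-mirror-362 | packages/ask-question/ask_question-1.2.10-py3-none-any.whl/ask_question/ask_question.py | remove_char_overflow
-- ===== SOURCE A (Python) =====
-- def remove_char_overflow(string: str, char: str, presence_tolerance: int = 1, case_sensitive: bool = False) -> str:
--     """ Remove the number of times a specific character appears in a string after the allowed number of times """
--     result = ""
--     for i in string:
--         if case_sensitive is False:
--             if i.lower() == char:
--                 if presence_tolerance > 0:
--                     result += i
--                     presence_tolerance -= 1
--             else:
--                 result += i
--         else:
--             if i == char:
--                 if presence_tolerance > 0: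
--                     result += i
--                     presence_tolerance -= 1
--             else:
--                 result += i
--     return result
-- ===== SOURCE B (Python) =====
-- def remove_char_overflow(string: str, char: str, presence_tolerance: int = 1, case_sensitive: bool = False) -> str:
--     """ Remove the number of times a specific character appears in a string after the allowed number of times """
--     if case_sensitive:
--         match = lambda c: c == char
--     else:
--         match = lambda c: c.lower() == char
--     keep = max(0, presence_tolerance)
--     positions = [i for i, c in enumerate(string) if match(c)]
--     if len(positions) <= keep:
--         return string
--     cut = positions[keep]
--     return string[:cut] + ''.join(c for c in string[cut:] if not match(c))
-- ===== Notes on version B (the rewrite author's own statement) =====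
-- stated objective: alternative
-- what changed: Replaces the single counter-carrying scan with a two-phase plan: first collect the indices of matching characters, then return an unchanged prefix up to the (keep+1)-th match and a match-free filtered suffix.
import Mathlib
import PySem

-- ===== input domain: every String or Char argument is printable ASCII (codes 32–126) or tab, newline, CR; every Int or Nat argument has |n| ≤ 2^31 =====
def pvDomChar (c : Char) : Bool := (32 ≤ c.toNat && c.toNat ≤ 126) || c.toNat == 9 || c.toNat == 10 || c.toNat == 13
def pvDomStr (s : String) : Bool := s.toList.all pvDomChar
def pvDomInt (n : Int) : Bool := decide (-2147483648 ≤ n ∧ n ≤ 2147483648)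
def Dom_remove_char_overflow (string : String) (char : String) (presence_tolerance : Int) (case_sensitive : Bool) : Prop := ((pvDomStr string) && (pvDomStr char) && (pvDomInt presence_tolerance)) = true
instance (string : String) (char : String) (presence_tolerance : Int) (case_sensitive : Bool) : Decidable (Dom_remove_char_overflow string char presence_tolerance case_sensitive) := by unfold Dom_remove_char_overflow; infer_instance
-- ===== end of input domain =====

-- B replaces A's single counter-carrying scan with an index-collection phase plus a prefix+filtered-suffix build (alternative decomposition, same cost).


-- ===== PORT A =====
-- literal transliteration of A: one left-to-right scan carrying (result, presence_tolerance)
def remove_char_overflow (string : String) (char : String) (presence_tolerance : Int) (case_sensitive : Bool) : String :=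
  let res := string.toList.foldl
    (fun (st : List Char × Int) i =>
      if case_sensitive = false then
        if PySem.Chars.lower [i] = char.toList then
          if st.2 > 0 then (st.1 ++ [i], st.2 - 1) else st
        else (st.1 ++ [i], st.2)
      else
        if [i] = char.toList then
          if st.2 > 0 then (st.1 ++ [i], st.2 - 1) else st
        else (st.1 ++ [i], st.2))
    ([], presence_tolerance)
  String.mk res.1

-- ===== PORT B =====
-- the case-adjusted match predicate (B's `match` lambda)
def rcoMatch (char : String) (case_sensitive : Bool) (c : Char) : Bool :=
  if case_sensitive then decide ([c] = char.toList)
  else decide (PySem.Chars.lower [c] = char.toList)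

-- port of B: collect matched indices; unchanged prefix up to the (keep+1)-th match, then a match-free filtered suffix.
-- string[:cut] / string[cut:] are ported as take/drop: cut is a list index (0 ≤ cut < len), where the slices are exact.
def remove_char_overflow_alt (string : String) (char : String) (presence_tolerance : Int) (case_sensitive : Bool) : String :=
  let l := string.toList
  let keep : Int := max 0 presence_tolerance
  let positions : List Int :=
    ((PySem.List.enumerate l).filter (fun p => rcoMatch char case_sensitive p.2)).map (·.1)
  if (positions.length : Int) ≤ keep then string
  else
    let cut : Nat := ((PySem.List.pyGet? positions keep).getD 0).toNat
    String.mk (l.take cut ++ (l.drop cut).filter (fun c => !rcoMatch char case_sensitive c))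

-- ===== PRECONDITION & SPEC =====
def Spec_remove_char_overflow (string : String) (char : String) (presence_tolerance : Int) (case_sensitive : Bool) (out : String) : Prop := out = remove_char_overflow_alt string char presence_tolerance case_sensitive
instance (string : String) (char : String) (presence_tolerance : Int) (case_sensitive : Bool) (out : String) : Decidable (Spec_remove_char_overflow string char presence_tolerance case_sensitive out) := by unfold Spec_remove_char_overflow; infer_instance

-- ===== CLAIM (what is proved, stated in full; the proofs are below) =====
def Claim_equal_remove_char_overflow : Prop := ∀ (string : String) (char : String) (presence_tolerance : Int) (case_sensitive : Bool), Dom_remove_char_overflow string char presence_tolerance case_sensitive → Spec_remove_char_overflow string char presence_tolerance case_sensitive (remove_char_overflow string char presence_tolerance case_sensitive)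

-- ===== LEMMAS AND PROOFS =====

-- A's loop step, abstracted over the match predicate
def rcoStep (p : Char → Bool) (st : List Char × Int) (i : Char) : List Char × Int :=
  if p i then (if st.2 > 0 then (st.1 ++ [i], st.2 - 1) else st) else (st.1 ++ [i], st.2)

-- the (0-based) indices of matching characters
def rcoIdx (p : Char → Bool) : List Char → List Int
  | [] => []
  | c :: cs => if p c then 0 :: (rcoIdx p cs).map (· + 1) else (rcoIdx p cs).map (· + 1)

theorem rcoIdx_length (p : Char → Bool) (l : List Char) :
    (rcoIdx p l).length = l.countP p := by
  induction l with
  | nil => rfl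
  | cons c cs ih =>
    simp only [rcoIdx, List.countP_cons]
    split_ifs with h <;> simp [ih]

theorem rcoIdx_nonneg (p : Char → Bool) (l : List Char) :
    ∀ x ∈ rcoIdx p l, 0 ≤ x := by
  induction l with
  | nil => simp [rcoIdx]
  | cons c cs ih =>
    simp only [rcoIdx]
    split_ifs with h
    · intro x hx
      rw [List.mem_cons] at hx
      rcases hx with rfl | hx
      · omega
      · obtain ⟨y, hy, rfl⟩ := List.mem_map.mp hx
        have := ih y hy; omega
    · intro x hx
      obtain ⟨y, hy, rfl⟩ := List.mem_map.mp hx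
      have := ih y hy; omega

theorem rcoPositions (p : Char → Bool) (l : List Char) (s : Int) :
    (((PySem.List.enumerate l s).filter (fun q => p q.2)).map (·.1))
      = (rcoIdx p l).map (fun n => s + n) := by
  induction l generalizing s with
  | nil => simp [PySem.List.enumerate_nil, rcoIdx]
  | cons c cs ih =>
    rw [PySem.List.enumerate_cons]
    by_cases h : p c
    · rw [rcoIdx, if_pos h, List.filter_cons_of_pos (by simpa using h),
        List.map_cons, List.map_cons, ih, List.map_map]
      refine congrArg₂ _ (by simp) (List.map_congr_left ?_)
      intro n _; simp only [Function.comp_apply]; ring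
    · rw [rcoIdx, if_neg h, List.filter_cons_of_neg (by simpa using h), ih, List.map_map]
      refine List.map_congr_left ?_
      intro n _; simp only [Function.comp_apply]; ring

-- A's loop once the tolerance is exhausted: a plain filter
theorem rcoFold_nonpos (p : Char → Bool) (l : List Char) (acc : List Char) (t : Int)
    (ht : t ≤ 0) :
    (l.foldl (rcoStep p) (acc, t)).1 = acc ++ l.filter (fun c => !p c) := by
  induction l generalizing acc with
  | nil => simp
  | cons c cs ih =>
    simp only [List.foldl_cons, rcoStep]
    by_cases h : p c
    · have hng : ¬ (t > 0) := by omega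
      simp [h, hng, ih acc, List.filter_cons]
    · simp [h, ih (acc ++ [c]), List.filter_cons]

-- A's loop when every match fits in the tolerance: identity
theorem rcoFold_le (p : Char → Bool) (l : List Char) (acc : List Char) (t : Int)
    (h : (l.countP p : Int) ≤ max 0 t) :
    (l.foldl (rcoStep p) (acc, t)).1 = acc ++ l := by
  induction l generalizing acc t with
  | nil => simp
  | cons c cs ih =>
    rw [List.countP_cons] at h
    simp only [List.foldl_cons, rcoStep]
    by_cases hc : p c
    · rw [if_pos hc] at h
      push_cast at h
      have ht : t > 0 := by omega
      have h' : (cs.countP p : Int) ≤ max 0 (t - 1) := by omega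
      rw [if_pos hc, if_pos (show ((acc, t).2 > 0) from ht), ih (acc ++ [c]) (t - 1) h']
      try simp
    · rw [if_neg hc] at h
      push_cast at h
      have h' : (cs.countP p : Int) ≤ max 0 t := by omega
      rw [if_neg hc, ih (acc ++ [c]) t h']
      try simp

-- A's loop with too many matches: unchanged prefix up to the (keep+1)-th match, filtered suffix
theorem rcoFold_lt (p : Char → Bool) (l : List Char) (acc : List Char) (t : Int)
    (h : max 0 t < (l.countP p : Int)) :
    (l.foldl (rcoStep p) (acc, t)).1 =
      acc ++ l.take ((rcoIdx p l).getD (max 0 t).toNat 0).toNat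
          ++ (l.drop ((rcoIdx p l).getD (max 0 t).toNat 0).toNat).filter (fun c => !p c) := by
  induction l generalizing acc t with
  | nil => simp at h
  | cons c cs ih =>
    rw [List.countP_cons] at h
    simp only [List.foldl_cons, rcoStep, rcoIdx]
    by_cases hc : p c
    · rw [if_pos hc] at h
      push_cast at h
      by_cases ht : t > 0
      · have hk : (max 0 t).toNat = (max 0 (t - 1)).toNat + 1 := by omega
        have hlen : (max 0 (t - 1)).toNat < (rcoIdx p cs).length := by
          rw [rcoIdx_length]; omega
        have hget : ((0 : Int) :: (rcoIdx p cs).map (· + 1)).getD ((max 0 t).toNat) 0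
            = (rcoIdx p cs).getD ((max 0 (t - 1)).toNat) 0 + 1 := by
          rw [hk]
          simp [List.getD_eq_getElem?_getD, List.getElem?_map,
            List.getElem?_eq_getElem hlen]
        have hnn : 0 ≤ (rcoIdx p cs).getD ((max 0 (t - 1)).toNat) 0 := by
          rw [List.getD_eq_getElem?_getD, List.getElem?_eq_getElem hlen]
          exact rcoIdx_nonneg p cs _ (List.getElem_mem hlen)
        have htn : ((rcoIdx p cs).getD ((max 0 (t - 1)).toNat) 0 + 1).toNat
            = ((rcoIdx p cs).getD ((max 0 (t - 1)).toNat) 0).toNat + 1 := by omega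
        have h' : max 0 (t - 1) < (cs.countP p : Int) := by omega
        rw [if_pos hc, if_pos (show ((acc, t).2 > 0) from ht), if_pos hc, hget, htn,
          List.take_succ_cons, List.drop_succ_cons, ih (acc ++ [c]) (t - 1) h']
        try simp
      · have hk : (max 0 t).toNat = 0 := by omega
        rw [if_pos hc, if_neg (show ¬ ((acc, t).2 > 0) from ht), if_pos hc, hk]
        simp only [List.getD_cons_zero, Int.toNat_zero, List.take_zero, List.drop_zero,
          List.nil_append, List.filter_cons]
        rw [rcoFold_nonpos p cs acc t (by omega)]
        simp [hc]
    · rw [if_neg hc] at h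
      push_cast at h
      have hlen : (max 0 t).toNat < (rcoIdx p cs).length := by
        rw [rcoIdx_length]; omega
      have hget : ((rcoIdx p cs).map (· + 1)).getD ((max 0 t).toNat) 0
          = (rcoIdx p cs).getD ((max 0 t).toNat) 0 + 1 := by
        simp [List.getD_eq_getElem?_getD, List.getElem?_map,
          List.getElem?_eq_getElem hlen]
      have hnn : 0 ≤ (rcoIdx p cs).getD ((max 0 t).toNat) 0 := by
        rw [List.getD_eq_getElem?_getD, List.getElem?_eq_getElem hlen]
        exact rcoIdx_nonneg p cs _ (List.getElem_mem hlen)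
      have htn : ((rcoIdx p cs).getD ((max 0 t).toNat) 0 + 1).toNat
          = ((rcoIdx p cs).getD ((max 0 t).toNat) 0).toNat + 1 := by omega
      have h' : max 0 t < (cs.countP p : Int) := by omega
      rw [if_neg hc, if_neg hc, hget, htn, List.take_succ_cons, List.drop_succ_cons,
        ih (acc ++ [c]) t h']
      try simp

-- the two ports agree for a given match predicate
theorem rco_core (string char : String) (t : Int) (cs : Bool) (p : Char → Bool)
    (hp : p = rcoMatch char cs)
    (hfold : remove_char_overflow string char t cs
        = String.mk ((string.toList.foldl (rcoStep p) ([], t)).1)) :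
    remove_char_overflow string char t cs = remove_char_overflow_alt string char t cs := by
  rw [hfold]
  unfold remove_char_overflow_alt
  dsimp only
  rw [← hp]
  rw [rcoPositions p string.toList 0]
  by_cases hle : ((((rcoIdx p string.toList).map (fun n => (0 : Int) + n)).length : Int)) ≤ max 0 t
  · rw [if_pos hle]
    rw [rcoFold_le p string.toList [] t
      (by rw [List.length_map, rcoIdx_length] at hle; exact hle)]
    simp [String.mk]
  · rw [if_neg hle]
    have hlt : max 0 t < (string.toList.countP p : Int) := by
      rw [List.length_map, rcoIdx_length] at hle
      omega
    have hlen : (max 0 t).toNat < (rcoIdx p string.toList).length := by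
      rw [rcoIdx_length]; omega
    have hcut : ((PySem.List.pyGet?
          ((rcoIdx p string.toList).map (fun n => (0 : Int) + n)) (max 0 t)).getD 0).toNat
        = ((rcoIdx p string.toList).getD (max 0 t).toNat 0).toNat := by
      have h1 : max 0 t = (((max 0 t).toNat : Nat) : Int) := by omega
      rw [h1, PySem.List.pyGet?_natCast]
      simp [List.getElem?_map, List.getElem?_eq_getElem hlen,
        List.getD_eq_getElem?_getD]
    rw [hcut, rcoFold_lt p string.toList [] t hlt]
    simp

-- ===== VERDICT (by name: the statement is the Claim_ definition above) =====
theorem remove_char_overflow_spec : Claim_equal_remove_char_overflow := by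
  intro string char t cs _
  unfold Spec_remove_char_overflow
  cases cs
  · exact rco_core string char t false (fun c => decide (PySem.Chars.lower [c] = char.toList))
      (by funext c; simp [rcoMatch])
      (by unfold remove_char_overflow rcoStep; simp)
  · exact rco_core string char t true (fun c => decide ([c] = char.toList))
      (by funext c; simp [rcoMatch])
      (by unfold remove_char_overflow rcoStep; simp)
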